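-- pv_equiv track=rewrite | github.com/AkifSivas58/LeetCodeSolutions | 3434-find-the-number-of-distinct-colors-among-the-balls/3434-find-the-number-of-distinct-colors-among-the-balls.py | queryResults
-- ===== SOURCE A (Python) =====
-- from typing import List
--
-- from collections import defaultdict
--
-- def queryResults(limit: int, queries: List[List[int]]) -> List[int]:
--     res = []
--     colors = defaultdict(int)
--     balls = defaultdict(int)
--     curr = 0
--     for x, y in queries:
--
--         if colors[x] != 0:
--             balls[colors[x]] -= 1
--             if balls[colors[x]] == 0:
--                 curr -= 1
--
--         if balls[y] == 0:
--             curr += 1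
--
--         balls[y] += 1
--         colors[x] = y
--         res.append(curr)
--
--     return res
-- ===== SOURCE B (Python) =====
-- def queryResults(limit, queries):
--     res = []
--     colors = {}
--     for x, y in queries:
--         colors[x] = y
--         res.append(len(set(colors.values())))
--     return res
-- ===== Notes on version B (the rewrite author's own statement) =====
-- stated objective: simpler
-- what changed: Replaces the incremental bookkeeping (per-color ball tally plus a running distinct counter with four update branches) by a single ball->color dict that is rescanned after each query with len(set(colors.values())).
-- outside the precondition, e.g. on queryResults(1, [[0, 0], [0, 1]]): A returns [1, 2], B returns [1, 1]
import Mathlib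
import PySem

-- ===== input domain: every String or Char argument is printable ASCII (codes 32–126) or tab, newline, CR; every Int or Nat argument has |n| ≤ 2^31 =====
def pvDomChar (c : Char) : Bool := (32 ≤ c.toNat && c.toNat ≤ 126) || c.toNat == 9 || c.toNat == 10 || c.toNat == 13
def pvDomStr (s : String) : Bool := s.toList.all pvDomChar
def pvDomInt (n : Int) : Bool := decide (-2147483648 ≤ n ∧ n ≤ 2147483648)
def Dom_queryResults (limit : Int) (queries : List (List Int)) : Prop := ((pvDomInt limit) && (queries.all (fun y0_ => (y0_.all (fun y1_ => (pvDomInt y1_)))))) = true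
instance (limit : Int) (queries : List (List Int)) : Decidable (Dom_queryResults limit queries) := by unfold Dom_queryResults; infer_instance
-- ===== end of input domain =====

-- B replaces A's incremental bookkeeping (per-color tally + running counter) by a
-- ball->color dict rescanned with len(set(colors.values())) after each query (simpler).

-- ===== PORT A =====
-- defaultdict reads are ported as getD _ 0; the dicts are never iterated, so the
-- implicit default insertion on read is unobservable and this is exact.
def qrA_step (st : List Int × PySem.Dict Int Int × PySem.Dict Int Int × Int)
    (q : List Int) : List Int × PySem.Dict Int Int × PySem.Dict Int Int × Int :=
  match q, st with
  | [x, y], (res, colors, balls, curr) =>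
    let cx := colors.getD x 0
    let balls1 := if cx ≠ 0 then balls.insert cx (balls.getD cx 0 - 1) else balls
    let curr1 := if cx ≠ 0 ∧ balls1.getD cx 0 = 0 then curr - 1 else curr
    let curr2 := if balls1.getD y 0 = 0 then curr1 + 1 else curr1
    let balls2 := balls1.insert y (balls1.getD y 0 + 1)
    (res ++ [curr2], colors.insert x y, balls2, curr2)
  | _, st => st   -- a query not of length 2 raises in Python; outside Pre_

def queryResults (limit : Int) (queries : List (List Int)) : List Int :=
  (queries.foldl qrA_step ([], PySem.Dict.empty, PySem.Dict.empty, 0)).1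

-- ===== PORT B =====
def qrB_step (st : List Int × PySem.Dict Int Int) (q : List Int) :
    List Int × PySem.Dict Int Int :=
  match q, st with
  | [x, y], (res, colors) =>
    let colors := colors.insert x y
    (res ++ [((PySem.Set.ofList colors.values).length : Int)], colors)
  | _, st => st   -- a query not of length 2 raises in Python; outside Pre_

def queryResults_alt (limit : Int) (queries : List (List Int)) : List Int :=
  (queries.foldl qrB_step ([], PySem.Dict.empty)).1

-- ===== PRECONDITION & SPEC =====
-- Pre_ excludes queries not of length 2 (both programs raise ValueError there) and
-- inputs that paint some ball with color 0 and touch that ball in a second query: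
-- color 0 means "unpainted" to A but is an ordinary color to B, so on such repaints
-- the two readings give different counts and neither is specified.
def Pre_queryResults (limit : Int) (queries : List (List Int)) : Prop :=
  ∀ q ∈ queries, q.length = 2 ∧
    (q.getD 1 0 = 0 → queries.countP (fun r => r.getD 0 0 == q.getD 0 0) ≤ 1)
instance (limit : Int) (queries : List (List Int)) : Decidable (Pre_queryResults limit queries) := by
  unfold Pre_queryResults; infer_instance

def pvWitness_queryResults : Int × List (List Int) :=
  (4, [[1, 4], [2, 5], [1, 3], [3, 4]])

def Spec_queryResults (limit : Int) (queries : List (List Int)) (out : List Int) : Prop := out = queryResults_alt limit queries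
instance (limit : Int) (queries : List (List Int)) (out : List Int) : Decidable (Spec_queryResults limit queries out) := by unfold Spec_queryResults; infer_instance

-- ===== CLAIM (what is proved, stated in full; the proofs are below) =====
def Claim_equal_queryResults : Prop := ∀ (limit : Int) (queries : List (List Int)), Dom_queryResults limit queries → Pre_queryResults limit queries → Spec_queryResults limit queries (queryResults limit queries)

-- ===== LEMMAS AND PROOFS =====

-- |set(l)| is the number of distinct elements of l.
lemma setLen_eq_card (l : List Int) :
    (PySem.Set.ofList l).length = l.toFinset.card := by
  have h1 : (PySem.Set.ofList l).toFinset = l.toFinset := by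
    ext v; simp [List.mem_toFinset, PySem.Set.mem_ofList]
  have h2 := List.toFinset_card_of_nodup (PySem.Set.nodup_ofList l)
  rw [← h2, h1]

-- decomposition of a dict with Nodup keys at a present key
lemma dict_split (d : PySem.Dict Int Int) (x c : Int)
    (hnd : d.keys.Nodup) (h : d.get? x = some c) :
    ∃ l1 l2, d.items = l1 ++ (x, c) :: l2 ∧
      (∀ y, (d.insert x y).items = l1 ++ (x, y) :: l2) ∧
      (∀ p ∈ l1 ++ l2, p.1 ≠ x) := by
  have hmem : (x, c) ∈ d.items := PySem.Dict.mem_items_of_get?_eq_some d h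
  obtain ⟨l1, l2, hsplit⟩ := List.append_of_mem hmem
  simp only [PySem.Dict.keys] at hnd
  rw [hsplit, List.map_append, List.map_cons] at hnd
  obtain ⟨hn1, hn2, hdisj⟩ := List.nodup_append.mp hnd
  have hxl2 : x ∉ List.map Prod.fst l2 := (List.nodup_cons.mp hn2).1
  have hxl1 : x ∉ List.map Prod.fst l1 := fun hx => hdisj x hx x (List.mem_cons_self ..) rfl
  have hne : ∀ p ∈ l1 ++ l2, p.1 ≠ x := by
    intro p hp hpx
    rcases List.mem_append.mp hp with hp1 | hp2
    · exact hxl1 (List.mem_map.mpr ⟨p, hp1, hpx⟩)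
    · exact hxl2 (List.mem_map.mpr ⟨p, hp2, hpx⟩)
  refine ⟨l1, l2, hsplit, ?_, hne⟩
  intro y
  have hcont : d.contains x = true := by
    rw [PySem.Dict.contains_eq_isSome_get?, h]; rfl
  rw [PySem.Dict.items_insert_of_contains d y hcont, hsplit]
  simp only [List.map_append, List.map_cons, BEq.rfl, if_pos]
  have emap : ∀ (l : List (Int × Int)), (∀ p ∈ l, p.1 ≠ x) →
      l.map (fun p => if p.1 == x then (x, y) else p) = l := by
    intro l hl
    have := List.map_congr_left (l := l)
      (f := fun p => if p.1 == x then (x, y) else p) (g := id)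
      (fun p hp => by simp [hl p hp])
    simpa using this
  rw [emap l1 (fun p hp => hne p (List.mem_append.mpr (Or.inl hp))),
      emap l2 (fun p hp => hne p (List.mem_append.mpr (Or.inr hp)))]

lemma toFinset_append_singleton (V : List Int) (y : Int) :
    (V ++ [y]).toFinset = insert y V.toFinset := by
  ext v; simp

lemma toFinset_mid (m1 m2 : List Int) (a : Int) :
    (m1 ++ a :: m2).toFinset = insert a (m1 ++ m2).toFinset := by
  ext v; simp

lemma card_insert_int (a : Int) (s : Finset Int) :
    ((insert a s).card : Int) = (s.card : Int) + (if a ∈ s then 0 else 1) := by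
  by_cases h : a ∈ s
  · simp [Finset.insert_eq_self.mpr h, h]
  · simp [Finset.card_insert_of_notMem h, h]

-- A's counter update for a first paint equals the new number of distinct colors
lemma curr_append (curr : Int) (V : List Int) (y : Int)
    (hc : curr = (V.toFinset.card : Int)) :
    (if V.count y = 0 then curr + 1 else curr) = ((insert y V.toFinset).card : Int) := by
  have hym : V.count y = 0 ↔ y ∉ V.toFinset := by simp [List.count_eq_zero]
  have e2 := card_insert_int y V.toFinset
  by_cases h2 : y ∈ V.toFinset <;> simp [h2, hym] at e2 hc ⊢ <;> omega

-- A's counter update for a repaint (old color c, new color y) equals the new distinct count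
lemma curr_replace (curr : Int) (M : List Int) (c y : Int)
    (hc : curr = ((insert c M.toFinset).card : Int)) :
    (if M.count y = 0 then (if M.count c = 0 then curr - 1 else curr) + 1
     else (if M.count c = 0 then curr - 1 else curr))
      = ((insert y M.toFinset).card : Int) := by
  have hcm : M.count c = 0 ↔ c ∉ M.toFinset := by simp [List.count_eq_zero]
  have hym : M.count y = 0 ↔ y ∉ M.toFinset := by simp [List.count_eq_zero]
  have e1 := card_insert_int c M.toFinset
  have e2 := card_insert_int y M.toFinset
  by_cases h1 : c ∈ M.toFinset <;> by_cases h2 : y ∈ M.toFinset <;>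
    simp [h1, h2, hcm, hym] at e1 e2 hc ⊢ <;> omega

-- the main loop invariant
lemma go_eq (qs : List (List Int)) (res : List Int)
    (colors balls : PySem.Dict Int Int) (curr : Int)
    (hpre : ∀ q ∈ qs, q.length = 2 ∧
      (q.getD 1 0 = 0 → qs.countP (fun r => r.getD 0 0 == q.getD 0 0) ≤ 1))
    (hz : ∀ z, colors.get? z = some 0 → ∀ q ∈ qs, q.getD 0 0 ≠ z)
    (hnd : colors.keys.Nodup)
    (hb : ∀ v, balls.getD v 0 = (colors.values.count v : Int))
    (hc : curr = ((colors.values).toFinset.card : Int)) :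
    (qs.foldl qrA_step (res, colors, balls, curr)).1 =
      (qs.foldl qrB_step (res, colors)).1 := by
  induction qs generalizing res colors balls curr with
  | nil => rfl
  | cons q rest ih =>
    have hq := hpre q (List.mem_cons_self ..)
    obtain ⟨x, y, rfl⟩ := List.length_eq_two.mp hq.1
    have hpre' : ∀ r ∈ rest, r.length = 2 ∧
        (r.getD 1 0 = 0 → rest.countP (fun s => s.getD 0 0 == r.getD 0 0) ≤ 1) := by
      intro r hr
      obtain ⟨h1, h2⟩ := hpre r (List.mem_cons_of_mem _ hr)
      refine ⟨h1, fun h0 => ?_⟩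
      have := h2 h0
      rw [List.countP_cons] at this
      omega
    have hz' : ∀ z, (colors.insert x y).get? z = some 0 → ∀ r ∈ rest, r.getD 0 0 ≠ z := by
      intro z hz0 r hr
      rw [PySem.Dict.get?_insert] at hz0
      by_cases hzx : z = x
      · rw [if_pos hzx] at hz0
        have hy0 : y = 0 := by injection hz0
        have hcnt0 := (hpre [x, y] (List.mem_cons_self ..)).2 (by simpa using hy0)
        rw [List.countP_cons] at hcnt0
        simp only [List.getD_cons_zero, beq_self_eq_true, if_true] at hcnt0
        have h0 : rest.countP (fun s => s.getD 0 0 == x) = 0 := by omega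
        have hnr := List.countP_eq_zero.mp h0 r hr
        simpa [hzx] using hnr
      · rw [if_neg hzx] at hz0
        exact hz z hz0 r (List.mem_cons_of_mem _ hr)
    have hnd' : (colors.insert x y).keys.Nodup := PySem.Dict.nodup_keys_insert _ x y hnd
    have stepB : qrB_step (res, colors) [x, y]
        = (res ++ [(((colors.insert x y).values.toFinset.card : Nat) : Int)], colors.insert x y) := by
      simp [qrB_step, setLen_eq_card]
    rcases hget : colors.get? x with _ | c
    · -- x not yet painted: colors gains a fresh key
      have hcx : colors.getD x 0 = 0 := by rw [PySem.Dict.getD_eq_get?_getD, hget]; rfl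
      have hcont : colors.contains x = false := by
        rw [PySem.Dict.contains_eq_isSome_get?, hget]; rfl
      have hvals : (colors.insert x y).values = colors.values ++ [y] := by
        simp only [PySem.Dict.values, PySem.Dict.items_insert_of_not_contains colors y hcont,
          List.map_append]
        rfl
      have hb' : ∀ v, (balls.insert y (balls.getD y 0 + 1)).getD v 0
          = ((colors.insert x y).values.count v : Int) := by
        intro v
        rw [PySem.Dict.getD_insert, hvals]
        by_cases hvy : v = y
        · subst hvy; simp [hb, List.count_append]
        · simp [hvy, hb, List.count_append, List.count_cons]; omega
      have hcurr' : (if colors.values.count y = 0 then curr + 1 else curr)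
          = (((colors.insert x y).values.toFinset.card : Nat) : Int) := by
        rw [hvals, toFinset_append_singleton]
        exact curr_append curr colors.values y hc
      have stepA : qrA_step (res, colors, balls, curr) [x, y]
          = (res ++ [if colors.values.count y = 0 then curr + 1 else curr],
             colors.insert x y, balls.insert y (balls.getD y 0 + 1),
             if colors.values.count y = 0 then curr + 1 else curr) := by
        simp [qrA_step, hcx, hb y]
      rw [List.foldl_cons, List.foldl_cons, stepA, stepB, hcurr']
      exact ih _ _ _ _ hpre' hz' hnd' hb' rfl
    · -- x already painted with color c
      have hcx : colors.getD x 0 = c := by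
        rw [PySem.Dict.getD_eq_get?_getD, hget]; rfl
      have hcz : c ≠ 0 := by
        intro h0
        exact hz x (by rw [hget, h0]) [x, y] (List.mem_cons_self ..) (by simp)
      obtain ⟨l1, l2, hitems, hins, hneq⟩ := dict_split colors x c hnd hget
      have hvals : colors.values = l1.map Prod.snd ++ c :: l2.map Prod.snd := by
        simp [PySem.Dict.values, hitems]
      have hvals' : (colors.insert x y).values
          = l1.map Prod.snd ++ y :: l2.map Prod.snd := by
        simp [PySem.Dict.values, hins y]
      have hcnt : ∀ v, colors.values.count v
          = (l1.map Prod.snd ++ l2.map Prod.snd).count v + (if v = c then 1 else 0) := by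
        intro v; rw [hvals]
        by_cases hvc : v = c <;> simp [hvc, List.count_append, List.count_cons] <;> omega
      have hcnt' : ∀ v, (colors.insert x y).values.count v
          = (l1.map Prod.snd ++ l2.map Prod.snd).count v + (if v = y then 1 else 0) := by
        intro v; rw [hvals']
        by_cases hvy : v = y <;> simp [hvy, List.count_append, List.count_cons] <;> omega
      have hball1c : (balls.insert c (balls.getD c 0 - 1)).getD c 0
          = ((l1.map Prod.snd ++ l2.map Prod.snd).count c : Int) := by
        rw [PySem.Dict.getD_insert]
        simp [hb c, hcnt c]
      have hball1y : (balls.insert c (balls.getD c 0 - 1)).getD y 0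
          = ((l1.map Prod.snd ++ l2.map Prod.snd).count y : Int) := by
        by_cases hyc : y = c
        · rw [hyc]; exact hball1c
        · rw [PySem.Dict.getD_insert, if_neg hyc, hb y, hcnt y]
          simp [hyc]
      have hb' : ∀ v, ((balls.insert c (balls.getD c 0 - 1)).insert y
            ((balls.insert c (balls.getD c 0 - 1)).getD y 0 + 1)).getD v 0
          = ((colors.insert x y).values.count v : Int) := by
        intro v
        rw [PySem.Dict.getD_insert, hcnt' v]
        by_cases hvy : v = y
        · rw [if_pos hvy, if_pos hvy, hball1y, hvy]
          push_cast; ring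
        · rw [if_neg hvy, if_neg hvy, PySem.Dict.getD_insert]
          by_cases hvc : v = c
          · rw [if_pos hvc, hvc, hb c, hcnt c, if_pos rfl]
            push_cast; ring
          · rw [if_neg hvc, hb v, hcnt v, if_neg hvc]
      have hcurr' : (if (l1.map Prod.snd ++ l2.map Prod.snd).count y = 0 then
              (if (l1.map Prod.snd ++ l2.map Prod.snd).count c = 0 then curr - 1 else curr) + 1
            else (if (l1.map Prod.snd ++ l2.map Prod.snd).count c = 0 then curr - 1 else curr))
          = (((colors.insert x y).values.toFinset.card : Nat) : Int) := by
        rw [hvals', toFinset_mid]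
        exact curr_replace curr _ c y (by rw [hc, hvals, toFinset_mid])
      have stepA : qrA_step (res, colors, balls, curr) [x, y]
          = (res ++ [if (l1.map Prod.snd ++ l2.map Prod.snd).count y = 0 then
                (if (l1.map Prod.snd ++ l2.map Prod.snd).count c = 0 then curr - 1 else curr) + 1
              else (if (l1.map Prod.snd ++ l2.map Prod.snd).count c = 0 then curr - 1 else curr)],
             colors.insert x y,
             (balls.insert c (balls.getD c 0 - 1)).insert y
               ((balls.insert c (balls.getD c 0 - 1)).getD y 0 + 1),
             if (l1.map Prod.snd ++ l2.map Prod.snd).count y = 0 then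
                (if (l1.map Prod.snd ++ l2.map Prod.snd).count c = 0 then curr - 1 else curr) + 1
              else (if (l1.map Prod.snd ++ l2.map Prod.snd).count c = 0 then curr - 1 else curr)) := by
        simp [qrA_step, hcx, hcz, hball1c, hball1y]
        split_ifs <;> omega
      rw [List.foldl_cons, List.foldl_cons, stepA, stepB, hcurr']
      exact ih _ _ _ _ hpre' hz' hnd' hb' rfl

-- ===== VERDICT (by name: the statement is the Claim_ definition above) =====
theorem queryResults_spec : Claim_equal_queryResults := by
  intro limit queries _ hpre
  unfold Spec_queryResults queryResults queryResults_alt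
  exact go_eq queries [] PySem.Dict.empty PySem.Dict.empty 0 hpre (by simp [PySem.Dict.get?_empty]) (by simp) (by simp) (by simp)
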